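-- pv_equiv track=rewrite | github.com/ellahas/evolutionary-wordle | evolutionary.py | calculate_fitness_weighted_match
-- ===== SOURCE A (Python) =====
-- WEIGHTS = [5,1]
--
-- def calculate_fitness_weighted_match(target_word, guess, weights = WEIGHTS):
--     """
--     Calculate fitness based on weighted matches (exact and partial).
--
--     Input:
--         target_word (str): The word we are trying to evolve towards.
--         guess (str): The current word being evaluated.
--         weights (list of int): Weights for exact matches (green) and partial matches (yellow).
--
--     Output:
--         fitness_score (int): Weighted fitness score based on matches.
--         placeholder (int): Placeholder value (always 0).
--     """
--     green_weight = weights[0]  # Weight for letters in the correct position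
--     yellow_weight = weights[1]  # Weight for correct letters in the wrong position
--
--     num_matching_chars = 0
--     num_yellow_chars = 0
--     target_word_list = list(target_word)
--     guess_list = list(guess)
--
--     # Calculate green matches
--     for i, (expected, actual) in enumerate(zip(target_word, guess)):
--         if expected == actual:
--             num_matching_chars += 1
--             target_word_list[i] = None
--             guess_list[i] = None
--
--     num_matching_chars*=green_weight
--
--     # Calculate yellow matches
--     for i, actual in enumerate(guess_list):
--         if actual and actual in target_word_list:
--             num_yellow_chars += 1
--             target_word_list[target_word_list.index(actual)] = None
--
--     num_yellow_chars*=yellow_weight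
--
--     fitness_score = num_matching_chars + num_yellow_chars
--     return fitness_score, 0
-- ===== SOURCE B (Python) =====
-- WEIGHTS = [5, 1]
--
-- def calculate_fitness_weighted_match(target_word, guess, weights=WEIGHTS):
--     greens = sum(1 for e, a in zip(target_word, guess) if e == a)
--     tl = list(target_word)
--     gl = list(guess)
--     total = sum(min(tl.count(c), gl.count(c)) for c in dict.fromkeys(tl))
--     yellows = total - greens
--     return greens * weights[0] + yellows * weights[1], 0
-- ===== Notes on version B (the rewrite author's own statement) =====
-- stated objective: simpler
-- what changed: A's masking of matched positions with None and its greedy yellow loop (membership test plus .index removal per guess letter) are replaced by the frequency-count identity: greens = equal positions over zip, total letter matches = sum over distinct target letters of min(count in target, count in guess), yellows = total - greens.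
import Mathlib
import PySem

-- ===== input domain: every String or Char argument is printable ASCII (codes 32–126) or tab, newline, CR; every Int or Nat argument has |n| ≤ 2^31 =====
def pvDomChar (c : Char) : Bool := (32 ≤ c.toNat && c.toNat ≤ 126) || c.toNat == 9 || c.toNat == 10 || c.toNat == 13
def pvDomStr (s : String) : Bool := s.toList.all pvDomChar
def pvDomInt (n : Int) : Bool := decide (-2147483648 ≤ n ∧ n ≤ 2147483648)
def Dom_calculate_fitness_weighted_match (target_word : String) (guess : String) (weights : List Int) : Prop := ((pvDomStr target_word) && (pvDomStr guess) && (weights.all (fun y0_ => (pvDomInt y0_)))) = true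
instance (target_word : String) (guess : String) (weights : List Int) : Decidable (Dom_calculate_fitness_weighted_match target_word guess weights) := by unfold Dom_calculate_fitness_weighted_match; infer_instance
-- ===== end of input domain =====

-- ===== PORT A =====
-- One honest line: B replaces A's None-masking + greedy .index yellow loop by the
-- frequency identity yellows = (sum of per-letter min counts) - greens; objective: simpler.

-- A's green loop: walk zip(target, guess), count equal positions and mask both lists
-- (None at matched positions); returns (greens, masked target list, masked guess list).
def pvAgreens : List Char → List Char → Nat × List (Option Char) × List (Option Char)
  | [], g => (0, [], g.map some)
  | t, [] => (0, t.map some, [])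
  | a :: t, b :: g =>
      let r := pvAgreens t g
      if a == b then (r.1 + 1, none :: r.2.1, none :: r.2.2)
      else (r.1, some a :: r.2.1, some b :: r.2.2)

-- A's 'target_word_list[target_word_list.index(actual)] = None' on the masked list.
def pvMaskFirst : List (Option Char) → Char → List (Option Char)
  | [], _ => []
  | x :: xs, c => if x == some c then none :: xs else x :: pvMaskFirst xs c

-- A's yellow loop: for each actual in guess_list, if truthy and in target_word_list,
-- count it and blank the first matching slot of the target list.
def pvAyellow : List (Option Char) → List (Option Char) → Nat
  | [], _ => 0
  | none :: gl, tl => pvAyellow gl tl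
  | some c :: gl, tl =>
      if some c ∈ tl then pvAyellow gl (pvMaskFirst tl c) + 1 else pvAyellow gl tl

def calculate_fitness_weighted_match (target_word : String) (guess : String) (weights : List Int) : Int × Int :=
  let green_weight := PySem.List.pyGetD weights 0 0    -- weights[0]; Pre_ keeps it in range
  let yellow_weight := PySem.List.pyGetD weights 1 0   -- weights[1]
  let r := pvAgreens target_word.toList guess.toList
  let num_matching_chars : Int := (r.1 : Int) * green_weight
  let num_yellow_chars : Int := (pvAyellow r.2.2 r.2.1 : Int) * yellow_weight
  (num_matching_chars + num_yellow_chars, 0)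

-- ===== PORT B =====
def calculate_fitness_weighted_match_alt (target_word : String) (guess : String) (weights : List Int) : Int × Int :=
  let tl := target_word.toList
  let gl := guess.toList
  let greens : Int := ((tl.zip gl).countP (fun p => p.1 == p.2) : Int)
  let total : Int := (((PySem.List.dedup tl).map (fun c => min (tl.count c) (gl.count c))).sum : Int)
  let yellows := total - greens
  (greens * PySem.List.pyGetD weights 0 0 + yellows * PySem.List.pyGetD weights 1 0, 0)

-- ===== PRECONDITION & SPEC =====
-- A evaluates weights[0] and weights[1]; on shorter lists it raises IndexError, so those
-- inputs are excluded (B raises there too).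
def Pre_calculate_fitness_weighted_match (_target_word : String) (_guess : String) (weights : List Int) : Prop :=
  2 ≤ weights.length
instance (target_word : String) (guess : String) (weights : List Int) : Decidable (Pre_calculate_fitness_weighted_match target_word guess weights) := by
  unfold Pre_calculate_fitness_weighted_match; infer_instance

def pvWitness_calculate_fitness_weighted_match : String × String × List Int := ("ables", "bales", [5, 1])

def Spec_calculate_fitness_weighted_match (target_word : String) (guess : String) (weights : List Int) (out : Int × Int) : Prop := out = calculate_fitness_weighted_match_alt target_word guess weights
instance (target_word : String) (guess : String) (weights : List Int) (out : Int × Int) : Decidable (Spec_calculate_fitness_weighted_match target_word guess weights out) := by unfold Spec_calculate_fitness_weighted_match; infer_instance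

-- ===== CLAIM (what is proved, stated in full; the proofs are below) =====
def Claim_equal_calculate_fitness_weighted_match : Prop := ∀ (target_word : String) (guess : String) (weights : List Int), Dom_calculate_fitness_weighted_match target_word guess weights → Pre_calculate_fitness_weighted_match target_word guess weights → Spec_calculate_fitness_weighted_match target_word guess weights (calculate_fitness_weighted_match target_word guess weights)

-- ===== LEMMAS AND PROOFS =====

-- The surviving (non-None) letters of a masked list.
def pvSomes (l : List (Option Char)) : List Char := l.filterMap id

theorem pvSomes_nil : pvSomes [] = [] := rfl
theorem pvSomes_cons_none (l : List (Option Char)) : pvSomes (none :: l) = pvSomes l := rfl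
theorem pvSomes_cons_some (c : Char) (l : List (Option Char)) :
    pvSomes (some c :: l) = c :: pvSomes l := rfl
theorem pvSomes_map_some (l : List Char) : pvSomes (l.map some) = l := by
  induction l with
  | nil => rfl
  | cons a l ih => simpa [pvSomes_cons_some] using ih

theorem pvMem_somes (tl : List (Option Char)) (c : Char) : some c ∈ tl ↔ c ∈ pvSomes tl := by
  simp [pvSomes, List.mem_filterMap]

theorem pvSomes_maskFirst (tl : List (Option Char)) (c : Char) :
    pvSomes (pvMaskFirst tl c) = (pvSomes tl).erase c := by
  induction tl with
  | nil => rfl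
  | cons x xs ih =>
      cases x with
      | none => simpa [pvMaskFirst, pvSomes_cons_none] using ih
      | some d =>
          by_cases h : d = c
          · simp [pvMaskFirst, pvSomes_cons_some, pvSomes_cons_none, h]
          · simpa [pvMaskFirst, pvSomes_cons_some, h, List.erase_cons] using ih

-- A's yellow loop counts exactly the multiset intersection of the surviving letters.
theorem pvAyellow_eq_inter_card (gl tl : List (Option Char)) :
    pvAyellow gl tl = Multiset.card ((pvSomes gl : Multiset Char) ∩ (pvSomes tl : Multiset Char)) := by
  induction gl generalizing tl with
  | nil => simp [pvAyellow, pvSomes_nil]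
  | cons x gl ih =>
      cases x with
      | none => simpa [pvAyellow, pvSomes_cons_none] using ih tl
      | some c =>
          by_cases h : some c ∈ tl
          · have hc : c ∈ (pvSomes tl : Multiset Char) := by
              simpa using (pvMem_somes tl c).mp h
            rw [pvAyellow, if_pos h, ih, pvSomes_maskFirst, pvSomes_cons_some]
            rw [show ((c :: pvSomes gl : List Char) : Multiset Char)
                  = c ::ₘ (pvSomes gl : Multiset Char) from (Multiset.cons_coe c _).symm]
            rw [Multiset.cons_inter_of_pos _ hc, ← Multiset.coe_erase]
            simp
          · have hc : c ∉ (pvSomes tl : Multiset Char) := by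
              simpa using fun hx => h ((pvMem_somes tl c).mpr (by simpa using hx))
            rw [pvAyellow, if_neg h, ih, pvSomes_cons_some]
            rw [show ((c :: pvSomes gl : List Char) : Multiset Char)
                  = c ::ₘ (pvSomes gl : Multiset Char) from (Multiset.cons_coe c _).symm]
            rw [Multiset.cons_inter_of_neg _ hc]

-- The green pass splits each word into surviving letters plus one shared multiset M
-- of matched letters, |M| = number of greens.
theorem pvAgreens_decomp (t g : List Char) :
    ∃ M : Multiset Char,
      Multiset.card M = (pvAgreens t g).1 ∧
      (pvSomes (pvAgreens t g).2.1 : Multiset Char) + M = (t : Multiset Char) ∧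
      (pvSomes (pvAgreens t g).2.2 : Multiset Char) + M = (g : Multiset Char) := by
  induction t generalizing g with
  | nil =>
      exact ⟨0, by simp [pvAgreens], by simp [pvAgreens, pvSomes_nil],
             by simp [pvAgreens, pvSomes_map_some]⟩
  | cons a t ih =>
      cases g with
      | nil =>
          exact ⟨0, by simp [pvAgreens], by simp [pvAgreens, pvSomes_cons_some, pvSomes_map_some],
                 by simp [pvAgreens, pvSomes_nil]⟩
      | cons b g =>
          obtain ⟨M, hcard, ht, hg⟩ := ih g
          by_cases h : a = b
          · subst h
            have h1 : pvAgreens (a :: t) (a :: g)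
                = ((pvAgreens t g).1 + 1, none :: (pvAgreens t g).2.1, none :: (pvAgreens t g).2.2) := by
              simp [pvAgreens]
            refine ⟨a ::ₘ M, ?_, ?_, ?_⟩
            · simp [h1, hcard]
            · rw [h1]; rw [pvSomes_cons_none, Multiset.add_cons, ht]
              exact (Multiset.cons_coe a t).symm
            · rw [h1]; rw [pvSomes_cons_none, Multiset.add_cons, hg]
              exact (Multiset.cons_coe a g).symm
          · have h1 : pvAgreens (a :: t) (b :: g)
                = ((pvAgreens t g).1, some a :: (pvAgreens t g).2.1, some b :: (pvAgreens t g).2.2) := by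
              simp [pvAgreens, h]
            refine ⟨M, ?_, ?_, ?_⟩
            · simp [h1, hcard]
            · rw [h1]; rw [pvSomes_cons_some, show ((a :: pvSomes (pvAgreens t g).2.1 : List Char) : Multiset Char)
                  = a ::ₘ (pvSomes (pvAgreens t g).2.1 : Multiset Char) from (Multiset.cons_coe a _).symm,
                  Multiset.cons_add, ht]
              exact (Multiset.cons_coe a t).symm
            · rw [h1]; rw [pvSomes_cons_some, show ((b :: pvSomes (pvAgreens t g).2.2 : List Char) : Multiset Char)
                  = b ::ₘ (pvSomes (pvAgreens t g).2.2 : Multiset Char) from (Multiset.cons_coe b _).symm,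
                  Multiset.cons_add, hg]
              exact (Multiset.cons_coe b g).symm

-- Adding the same multiset to both sides adds it to the intersection.
theorem pvInter_add_add (S T M : Multiset Char) : (S + M) ∩ (T + M) = (S ∩ T) + M := by
  ext a
  simp [Multiset.count_inter, Multiset.count_add]

-- greens + yellows = |target ∩ guess| (multiset intersection).
theorem pvGreens_add_yellow (t g : List Char) :
    (pvAgreens t g).1 + pvAyellow (pvAgreens t g).2.2 (pvAgreens t g).2.1
      = Multiset.card ((t : Multiset Char) ∩ (g : Multiset Char)) := by
  obtain ⟨M, hcard, ht, hg⟩ := pvAgreens_decomp t g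
  rw [pvAyellow_eq_inter_card, ← ht, ← hg, pvInter_add_add]
  rw [Multiset.inter_comm]
  simp [hcard]
  omega

-- The green count is the countP over zip that B computes.
theorem pvAgreens_fst (t g : List Char) :
    (pvAgreens t g).1 = (t.zip g).countP (fun p => p.1 == p.2) := by
  induction t generalizing g with
  | nil => simp [pvAgreens]
  | cons a t ih =>
      cases g with
      | nil => simp [pvAgreens]
      | cons b g =>
          by_cases h : a = b
          · simp [pvAgreens, h, ih]
          · simp [pvAgreens, h, ih]

-- B's sum of per-letter min counts is |target ∩ guess|.
theorem pvTotal_eq_inter_card (t g : List Char) :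
    ((PySem.List.dedup t).map (fun c => min (t.count c) (g.count c))).sum
      = Multiset.card ((t : Multiset Char) ∩ (g : Multiset Char)) := by
  have hfin : (PySem.List.dedup t).toFinset = t.toFinset := by
    ext a; simp
  have hsub : ((t : Multiset Char) ∩ (g : Multiset Char)).toFinset ⊆ t.toFinset := by
    intro a ha
    simp only [Multiset.mem_toFinset, Multiset.mem_inter, Multiset.mem_coe,
      List.mem_toFinset] at ha ⊢
    exact ha.1
  calc ((PySem.List.dedup t).map (fun c => min (t.count c) (g.count c))).sum
      = ∑ a ∈ t.toFinset, min (t.count a) (g.count a) := by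
        rw [← hfin, List.sum_toFinset _ (PySem.List.nodup_dedup t)]
    _ = ∑ a ∈ t.toFinset, Multiset.count a ((t : Multiset Char) ∩ (g : Multiset Char)) := by
        refine Finset.sum_congr rfl ?_
        intro a _
        simp
    _ = ∑ a ∈ ((t : Multiset Char) ∩ (g : Multiset Char)).toFinset,
          Multiset.count a ((t : Multiset Char) ∩ (g : Multiset Char)) := by
        refine (Finset.sum_subset hsub ?_).symm
        intro a hat ha
        rw [Multiset.count_eq_zero]
        simp only [Multiset.mem_toFinset, Multiset.mem_inter, Multiset.mem_coe,
          List.mem_toFinset] at hat ha ⊢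
        tauto
    _ = Multiset.card ((t : Multiset Char) ∩ (g : Multiset Char)) :=
        Multiset.toFinset_sum_count_eq _

-- ===== VERDICT (by name: the statement is the Claim_ definition above) =====
theorem calculate_fitness_weighted_match_spec : Claim_equal_calculate_fitness_weighted_match := by
  intro t g w _ _
  unfold Spec_calculate_fitness_weighted_match
  unfold calculate_fitness_weighted_match calculate_fitness_weighted_match_alt
  have htot := pvTotal_eq_inter_card t.toList g.toList
  have hgy := pvGreens_add_yellow t.toList g.toList
  have hfst := pvAgreens_fst t.toList g.toList
  simp only
  refine Prod.ext ?_ rfl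
  simp only [htot, ← hgy, hfst]
  push_cast
  ring
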